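-- pv_equiv track=rewrite | github.com/EricPedley/peg-game | main.py | stringifyState
-- ===== SOURCE A (Python) =====
-- def stringifyState(state: int):
--     str_rep = ""
--     for i in range(5):
--         str_rep += " " * (4 - i)
--         for j in range(i + 1):
--             str_rep += f"{int(state & (1 << (i * (i + 1) // 2 + j)) > 0)} "
--         str_rep += "\n"
--     return str_rep
-- ===== SOURCE B (Python) =====
-- def stringifyState(state: int):
--     bits = ["1" if state & (1 << k) > 0 else "0" for k in range(15)]
--     rows = []
--     off = 0
--     for i in range(5):
--         rows.append(" " * (4 - i) + " ".join(bits[off:off + i + 1]) + " \n")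
--         off += i + 1
--     return "".join(rows)
-- ===== Notes on version B (the rewrite author's own statement) =====
-- stated objective: alternative
-- what changed: B first extracts every peg bit into a flat table of digit strings in one pass, then assembles the triangle row by row from slices of that table using ' '.join plus an explicit trailing-space-newline terminator, instead of A's character-by-character accumulation with an inline closed-form triangular bit index.
import Mathlib
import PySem

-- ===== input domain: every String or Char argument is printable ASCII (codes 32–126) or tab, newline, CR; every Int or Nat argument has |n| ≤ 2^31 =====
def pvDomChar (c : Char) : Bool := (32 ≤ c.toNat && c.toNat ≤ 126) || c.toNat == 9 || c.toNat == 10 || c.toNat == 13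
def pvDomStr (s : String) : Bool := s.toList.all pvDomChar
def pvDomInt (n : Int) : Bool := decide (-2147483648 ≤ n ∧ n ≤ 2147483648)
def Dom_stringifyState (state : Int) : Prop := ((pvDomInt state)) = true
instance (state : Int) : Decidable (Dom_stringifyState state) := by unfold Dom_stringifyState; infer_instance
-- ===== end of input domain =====

-- B builds a flat table of the 15 bit-digit strings first, then assembles the triangle
-- row by row from slices of that table with ' '.join (alternative decomposition; same output).

-- ===== PORT A =====
def stringifyState (state : Int) : String :=
  (PySem.List.pyRange 0 5 1).foldl (fun str_rep i =>
    let str_rep := str_rep ++ String.ofList (List.replicate (4 - i).toNat ' ')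
    let str_rep := (PySem.List.pyRange 0 (i + 1) 1).foldl (fun s j =>
      s ++ (if PySem.Int.band state ((1 : Int) <<< (PySem.Int.floordiv (i * (i + 1)) 2 + j).toNat) > 0
            then "1 " else "0 ")) str_rep
    str_rep ++ "\n") ""

-- ===== PORT B =====
def stringifyState_alt (state : Int) : String :=
  let bits : List String := (PySem.List.pyRange 0 15 1).map (fun k =>
    if PySem.Int.band state ((1 : Int) <<< k.toNat) > 0 then "1" else "0")
  let out := (PySem.List.pyRange 0 5 1).foldl (fun (acc : List String × Int) i =>
    (acc.1 ++ [String.ofList (List.replicate (4 - i).toNat ' ')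
               ++ PySem.Str.join " " (PySem.List.slice bits (some acc.2) (some (acc.2 + i + 1)))
               ++ " \n"],
     acc.2 + i + 1)) ([], 0)
  PySem.Str.join "" out.1

-- ===== PRECONDITION & SPEC =====
def Spec_stringifyState (state : Int) (out : String) : Prop := out = stringifyState_alt state
instance (state : Int) (out : String) : Decidable (Spec_stringifyState state out) := by unfold Spec_stringifyState; infer_instance

-- ===== CLAIM (what is proved, stated in full; the proofs are below) =====
def Claim_equal_stringifyState : Prop := ∀ (state : Int), Dom_stringifyState state → Spec_stringifyState state (stringifyState state)

-- ===== LEMMAS AND PROOFS =====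

-- A's digit-plus-space atom is B's bare digit followed by a space (on the char-list side)
theorem pv_atomA (c : Prop) [Decidable c] :
    (if c then ("1 " : String) else "0 ").toList
      = (if c then (['1'] : List Char) else ['0']) ++ [' '] := by
  split <;> rfl

-- B's bare digit atom on the char-list side
theorem pv_atomB (c : Prop) [Decidable c] :
    (if c then ("1" : String) else "0").toList
      = (if c then (['1'] : List Char) else ['0']) := by
  split <;> rfl

-- ===== VERDICT (by name: the statement is the Claim_ definition above) =====
set_option maxHeartbeats 1000000 in
theorem stringifyState_spec : Claim_equal_stringifyState := by
  intro state _
  unfold Spec_stringifyState stringifyState stringifyState_alt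
  have h0 : ((1:Int) <<< (0:Nat)) = 1 := rfl
  have h0' : ((1:Int) <<< (0:Int)) = 1 := rfl
  rw [← String.toList_inj]
  simp [PySem.List.pyRange, PySem.List.slice, PySem.Str.join, PySem.Chars.join,
    pv_atomA, pv_atomB, List.append_assoc, PySem.Int.floordiv, List.replicate,
    List.range_succ, List.foldl, List.intercalate, List.intersperse, h0, h0']
  rfl
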